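-- pv_equiv track=rewrite | github.com/divyachoudhary2809/DiNucleotideShuffling | dns.py | for_check
-- ===== SOURCE A (Python) =====
-- def for_check(s):
--     countA=0
--     countG=0
--     countT=0
--     countC=0
--     for i in range (0, len(s)-1):
--         if (s[i] == s[i+1]) and (s[i]== 'A'):
--             countA+=1
--         if (s[i] == s[i+1]) and (s[i]== 'G'):
--             countG+=1
--         if (s[i] == s[i+1]) and (s[i]== 'T'):
--             countT+=1
--         if (s[i] == s[i+1]) and (s[i]== 'C'):
--             countC+=1
--     AG2 = s.count('AG')
--     AT2 = s.count('AT')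
--     AC2 = s.count('AC')
--     CA2 = s.count('CA')
--     CG2 = s.count('CG')
--     CT2 = s.count('CT')
--     TA2 = s.count('TA')
--     TG2 = s.count('TG')
--     TC2 = s.count('TC')
--     GA2 = s.count('CA')
--     GT2 = s.count('GT')
--     GC2 = s.count('GC')
--
--     AA2=countA
--     GG2=countG
--     TT2=countT
--     CC2=countC
--
--     return [AG2,AA2,AT2,AC2,CA2,CG2,CT2,CC2,TA2,TG2,TT2,TC2,GA2,GG2,GT2,GC2]
-- ===== SOURCE B (Python) =====
-- def for_check(s):
--     pairs = [x + y for x, y in zip(s, s[1:])]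
--     tally = {}
--     for p in pairs:
--         tally[p] = tally.get(p, 0) + 1
--     # the GA slot reads the CA count, matching A's assignment for that slot
--     order = ["AG", "AA", "AT", "AC", "CA", "CG", "CT", "CC",
--              "TA", "TG", "TT", "TC", "CA", "GG", "GT", "GC"]
--     return [tally.get(p, 0) for p in order]
-- ===== Notes on version B (the rewrite author's own statement) =====
-- stated objective: simpler
-- what changed: B makes one pass over the adjacent character pairs, tallying each two-character slice in a dict, and reads the 16 result slots from that table (with the GA slot reading the CA count, as A does), replacing A's four-counter index loop plus twelve separate str.count scans.
import Mathlib
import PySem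

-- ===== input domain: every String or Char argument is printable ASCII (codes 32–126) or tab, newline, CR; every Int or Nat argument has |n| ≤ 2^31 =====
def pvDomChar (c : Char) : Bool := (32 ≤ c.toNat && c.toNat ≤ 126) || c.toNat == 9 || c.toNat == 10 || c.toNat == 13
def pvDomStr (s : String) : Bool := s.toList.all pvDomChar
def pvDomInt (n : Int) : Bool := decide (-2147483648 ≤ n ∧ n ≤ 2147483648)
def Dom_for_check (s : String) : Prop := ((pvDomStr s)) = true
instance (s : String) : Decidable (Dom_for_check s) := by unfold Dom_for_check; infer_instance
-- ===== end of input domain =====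

-- B replaces A's four-counter index loop plus twelve str.count scans by one pass tallying adjacent
-- two-character slices into a dict and reading the 16 slots from that table (the GA slot reads the
-- CA count, as A assigns it); proved equal to A on the whole domain.


-- ===== PORT A =====
-- literal transliteration of A: an index loop keeping four equal-neighbour counters,
-- then twelve s.count calls (including GA2 = s.count('CA')), assembled in A's order
def for_check (s : String) : List Int :=
  let cs := s.toList
  let st := (PySem.List.pyRange 0 ((cs.length : Int) - 1) 1).foldl
    (fun (st : Int × Int × Int × Int) i =>
      let x := PySem.List.pyGetD cs i '?'
      let y := PySem.List.pyGetD cs (i + 1) '?'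
      let cA := if x = y ∧ x = 'A' then st.1 + 1 else st.1
      let cG := if x = y ∧ x = 'G' then st.2.1 + 1 else st.2.1
      let cT := if x = y ∧ x = 'T' then st.2.2.1 + 1 else st.2.2.1
      let cC := if x = y ∧ x = 'C' then st.2.2.2 + 1 else st.2.2.2
      (cA, cG, cT, cC)) (0, 0, 0, 0)
  let AG2 : Int := PySem.Str.count s "AG"
  let AT2 : Int := PySem.Str.count s "AT"
  let AC2 : Int := PySem.Str.count s "AC"
  let CA2 : Int := PySem.Str.count s "CA"
  let CG2 : Int := PySem.Str.count s "CG"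
  let CT2 : Int := PySem.Str.count s "CT"
  let TA2 : Int := PySem.Str.count s "TA"
  let TG2 : Int := PySem.Str.count s "TG"
  let TC2 : Int := PySem.Str.count s "TC"
  let GA2 : Int := PySem.Str.count s "CA"
  let GT2 : Int := PySem.Str.count s "GT"
  let GC2 : Int := PySem.Str.count s "GC"
  [AG2, st.1, AT2, AC2, CA2, CG2, CT2, st.2.2.2, TA2, TG2, st.2.2.1, TC2, GA2, st.2.1, GT2, GC2]

-- ===== PORT B =====
-- literal transliteration of B: the adjacent two-character slices, a tally dict built in one pass,
-- and the 16 slots read from the table (string keys carried as their char lists, per the convention);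
-- the GA slot reads the ['C','A'] tally, matching A's assignment for that slot
def for_check_alt (s : String) : List Int :=
  let cs := s.toList
  let pairs := (cs.zip (PySem.List.slice cs (some 1) none)).map (fun xy => [xy.1, xy.2])
  let tally := pairs.foldl
    (fun (d : PySem.Dict (List Char) Int) p => d.insert p (d.getD p 0 + 1)) PySem.Dict.empty
  let order : List (List Char) :=
    [['A','G'], ['A','A'], ['A','T'], ['A','C'], ['C','A'], ['C','G'], ['C','T'], ['C','C'],
     ['T','A'], ['T','G'], ['T','T'], ['T','C'], ['C','A'], ['G','G'], ['G','T'], ['G','C']]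
  order.map (fun p => tally.getD p 0)

-- ===== PRECONDITION & SPEC =====
def Spec_for_check (s : String) (out : List Int) : Prop := out = for_check_alt s
instance (s : String) (out : List Int) : Decidable (Spec_for_check s out) := by unfold Spec_for_check; infer_instance

-- ===== CLAIM =====
def Claim_equal_for_check : Prop := ∀ (s : String), Dom_for_check s → Spec_for_check s (for_check s)

-- ===== LEMMAS AND PROOFS =====

-- the adjacent pairs of cs, as A's index loop reads them
theorem pv_map_range_pairs (cs : List Char) :
    (PySem.List.pyRange 0 ((cs.length : Int) - 1) 1).map
      (fun i => (PySem.List.pyGetD cs i '?', PySem.List.pyGetD cs (i + 1) '?'))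
      = cs.zip cs.tail := by
  rw [PySem.List.pyRange_one]
  have hl : ((cs.length : Int) - 1 - 0).toNat = cs.length - 1 := by omega
  rw [hl]
  apply List.ext_getElem
  · simp [List.length_zip]
  · intro k h1 h2
    simp only [List.getElem_map, List.getElem_range, List.getElem_zip, List.getElem_tail]
    simp at h1
    have hk1 : k < cs.length := by omega
    have hk2 : k + 1 < cs.length := by omega
    refine Prod.ext ?_ ?_
    · rw [show ((0:Int) + (k:Int)) = ((k:Nat) : Int) by omega, PySem.List.pyGetD_natCast]
      simp [hk1]
    · rw [show ((0:Int) + (k:Int) + 1) = (((k+1:Nat)) : Int) by push_cast; ring, PySem.List.pyGetD_natCast]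
      simp [hk2]

-- A's four-counter loop over the pair list counts the four homodimers
theorem pv_loop4 (l : List (Char × Char)) : ∀ (a g t c : Int),
    l.foldl (fun (st : Int × Int × Int × Int) (xy : Char × Char) =>
      let x := xy.1
      let y := xy.2
      let cA := if x = y ∧ x = 'A' then st.1 + 1 else st.1
      let cG := if x = y ∧ x = 'G' then st.2.1 + 1 else st.2.1
      let cT := if x = y ∧ x = 'T' then st.2.2.1 + 1 else st.2.2.1
      let cC := if x = y ∧ x = 'C' then st.2.2.2 + 1 else st.2.2.2
      (cA, cG, cT, cC)) (a, g, t, c)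
    = (a + l.count ('A', 'A'), g + l.count ('G', 'G'), t + l.count ('T', 'T'), c + l.count ('C', 'C')) := by
  induction l with
  | nil => simp
  | cons hd tl ih =>
    intro a g t c
    obtain ⟨x, y⟩ := hd
    have key : ∀ (v : Char) (n : Int),
        (if x = y ∧ x = v then n + 1 else n) + (tl.count (v, v) : Int)
          = n + (((x, y) :: tl).count (v, v) : Int) := by
      intro v n
      rw [List.count_cons]
      by_cases h : x = y ∧ x = v
      · obtain ⟨h1, h2⟩ := h
        have hb : ((x, y) == (v, v)) = true := by
          rw [beq_iff_eq, Prod.mk.injEq]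
          exact ⟨h2, h1.symm.trans h2⟩
        rw [if_pos ⟨h1, h2⟩, hb]
        push_cast; norm_num; try ring
      · have hb : ((x, y) == (v, v)) = false := by
          rw [beq_eq_false_iff_ne]
          intro he
          obtain ⟨e1, e2⟩ := Prod.mk.inj he
          exact h ⟨e1.trans e2.symm, e1⟩
        rw [if_neg h, hb]
        push_cast; norm_num; try ring
    simp only [List.foldl_cons, ih]
    refine Prod.ext ?_ (Prod.ext ?_ (Prod.ext ?_ ?_)) <;> simp only []
    · exact key 'A' a
    · exact key 'G' g
    · exact key 'T' t
    · exact key 'C' c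

-- Python's non-overlapping s.count for a two-character needle of DISTINCT characters
-- equals the adjacent-pair count (distinct-character occurrences cannot overlap)
theorem pv_zip_cons_ne (x y z : Char) (hz : z ≠ x) (l : List Char) :
    ((z :: l).zip l).count (x, y) = (l.zip l.tail).count (x, y) := by
  cases l with
  | nil => simp
  | cons h t =>
    simp only [List.zip_cons_cons, List.count_cons, List.tail_cons]
    have : ((z, h) == (x, y)) = false := by
      rw [beq_eq_false_iff_ne]; intro he; exact hz (Prod.mk.inj he).1
    rw [this]; simp

theorem pv_go_distinct (x y : Char) (hxy : x ≠ y) :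
    ∀ (fuel : Nat) (cs : List Char) (acc : Nat), cs.length ≤ fuel →
      PySem.Chars.count.go [x, y] fuel cs acc = acc + (cs.zip cs.tail).count (x, y) := by
  intro fuel
  induction fuel with
  | zero =>
    intro cs acc h
    have : cs = [] := List.eq_nil_of_length_eq_zero (Nat.le_zero.mp h)
    subst this
    simp [PySem.Chars.count.go]
  | succ n ih =>
    intro cs acc h
    cases cs with
    | nil => simp [PySem.Chars.count.go]
    | cons c t =>
      rw [PySem.Chars.count.go]
      by_cases hp : [x, y].isPrefixOf (c :: t) = true
      · rw [if_pos hp]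
        obtain ⟨hc, ht⟩ : x = c ∧ [y].isPrefixOf t = true := by
          simpa [List.isPrefixOf] using hp
        cases t with
        | nil => simp [List.isPrefixOf] at ht
        | cons d u =>
          obtain hd : y = d := by simpa [List.isPrefixOf] using ht
          subst hc; subst hd
          simp only [List.length_cons] at h
          have hu : u.length ≤ n := by omega
          rw [show List.drop [x, y].length (x :: y :: u) = u by simp]
          rw [ih u (acc + 1) hu]
          have h1 : ((x :: y :: u).zip (x :: y :: u).tail).count (x, y)
              = 1 + ((y :: u).zip u).count (x, y) := by
            simp only [List.tail_cons, List.zip_cons_cons, List.count_cons]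
            simp only [beq_self_eq_true, if_true]
            omega
          rw [h1, pv_zip_cons_ne x y y (Ne.symm hxy) u]
          omega
      · rw [if_neg hp]
        simp only [List.length_cons] at h
        rw [ih t acc (by omega)]
        cases t with
        | nil => simp
        | cons d u =>
          have hne : (c, d) ≠ (x, y) := by
            intro he
            obtain ⟨e1, e2⟩ := Prod.mk.inj he
            exact hp (by simp [List.isPrefixOf, e1, e2])
          simp only [List.tail_cons, List.zip_cons_cons, List.count_cons]
          have : ((c, d) == (x, y)) = false := by rw [beq_eq_false_iff_ne]; exact hne
          rw [this]; simp

theorem pv_count_distinct (x y : Char) (hxy : x ≠ y) (cs : List Char) :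
    PySem.Chars.count cs [x, y] = (cs.zip cs.tail).count (x, y) := by
  rw [PySem.Chars.count]
  simp only [List.isEmpty_cons, Bool.false_eq_true, if_false]
  simpa using pv_go_distinct x y hxy cs.length cs 0 le_rfl

-- A's index loop, rewritten as a fold over the adjacent pairs
theorem pv_loop_idx (cs : List Char) :
    (PySem.List.pyRange 0 ((cs.length : Int) - 1) 1).foldl
    (fun (st : Int × Int × Int × Int) i =>
      let x := PySem.List.pyGetD cs i '?'
      let y := PySem.List.pyGetD cs (i + 1) '?'
      let cA := if x = y ∧ x = 'A' then st.1 + 1 else st.1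
      let cG := if x = y ∧ x = 'G' then st.2.1 + 1 else st.2.1
      let cT := if x = y ∧ x = 'T' then st.2.2.1 + 1 else st.2.2.1
      let cC := if x = y ∧ x = 'C' then st.2.2.2 + 1 else st.2.2.2
      (cA, cG, cT, cC)) (0, 0, 0, 0)
    = (((cs.zip cs.tail).count ('A','A') : Int), ((cs.zip cs.tail).count ('G','G') : Int),
       ((cs.zip cs.tail).count ('T','T') : Int), ((cs.zip cs.tail).count ('C','C') : Int)) := by
  have h2 := List.foldl_map
    (f := fun i => (PySem.List.pyGetD cs i '?', PySem.List.pyGetD cs (i + 1) '?'))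
    (g := fun (st : Int × Int × Int × Int) (xy : Char × Char) =>
      let x := xy.1
      let y := xy.2
      let cA := if x = y ∧ x = 'A' then st.1 + 1 else st.1
      let cG := if x = y ∧ x = 'G' then st.2.1 + 1 else st.2.1
      let cT := if x = y ∧ x = 'T' then st.2.2.1 + 1 else st.2.2.1
      let cC := if x = y ∧ x = 'C' then st.2.2.2 + 1 else st.2.2.2
      (cA, cG, cT, cC))
    (l := PySem.List.pyRange 0 ((cs.length : Int) - 1) 1) (init := ((0, 0, 0, 0) : Int × Int × Int × Int))
  rw [pv_map_range_pairs, pv_loop4] at h2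
  simpa using h2.symm

-- closed form of port A
theorem pv_A_closed (s : String) :
    for_check s =
      [((s.toList.zip s.toList.tail).count ('A', 'G') : Int),
       ((s.toList.zip s.toList.tail).count ('A', 'A') : Int),
       ((s.toList.zip s.toList.tail).count ('A', 'T') : Int),
       ((s.toList.zip s.toList.tail).count ('A', 'C') : Int),
       ((s.toList.zip s.toList.tail).count ('C', 'A') : Int),
       ((s.toList.zip s.toList.tail).count ('C', 'G') : Int),
       ((s.toList.zip s.toList.tail).count ('C', 'T') : Int),
       ((s.toList.zip s.toList.tail).count ('C', 'C') : Int),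
       ((s.toList.zip s.toList.tail).count ('T', 'A') : Int),
       ((s.toList.zip s.toList.tail).count ('T', 'G') : Int),
       ((s.toList.zip s.toList.tail).count ('T', 'T') : Int),
       ((s.toList.zip s.toList.tail).count ('T', 'C') : Int),
       ((s.toList.zip s.toList.tail).count ('C', 'A') : Int),
       ((s.toList.zip s.toList.tail).count ('G', 'G') : Int),
       ((s.toList.zip s.toList.tail).count ('G', 'T') : Int),
       ((s.toList.zip s.toList.tail).count ('G', 'C') : Int)] := by
  unfold for_check
  dsimp only
  rw [pv_loop_idx]
  have hc : ∀ t : String, PySem.Str.count s t = PySem.Chars.count s.toList t.toList := by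
    intro t; simp [PySem.Str.count]
  simp only [hc]
  rw [show ("AG" : String).toList = ['A','G'] from rfl,
      show ("AT" : String).toList = ['A','T'] from rfl,
      show ("AC" : String).toList = ['A','C'] from rfl,
      show ("CA" : String).toList = ['C','A'] from rfl,
      show ("CG" : String).toList = ['C','G'] from rfl,
      show ("CT" : String).toList = ['C','T'] from rfl,
      show ("TA" : String).toList = ['T','A'] from rfl,
      show ("TG" : String).toList = ['T','G'] from rfl,
      show ("TC" : String).toList = ['T','C'] from rfl,
      show ("GT" : String).toList = ['G','T'] from rfl,
      show ("GC" : String).toList = ['G','C'] from rfl]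
  rw [pv_count_distinct 'A' 'G' (by decide) s.toList]
  rw [pv_count_distinct 'A' 'T' (by decide) s.toList]
  rw [pv_count_distinct 'A' 'C' (by decide) s.toList]
  rw [pv_count_distinct 'C' 'A' (by decide) s.toList]
  rw [pv_count_distinct 'C' 'G' (by decide) s.toList]
  rw [pv_count_distinct 'C' 'T' (by decide) s.toList]
  rw [pv_count_distinct 'T' 'A' (by decide) s.toList]
  rw [pv_count_distinct 'T' 'G' (by decide) s.toList]
  rw [pv_count_distinct 'T' 'C' (by decide) s.toList]
  rw [pv_count_distinct 'G' 'T' (by decide) s.toList]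
  rw [pv_count_distinct 'G' 'C' (by decide) s.toList]

theorem pv_pair_inj : Function.Injective (fun xy : Char × Char => [xy.1, xy.2]) := by
  intro a b h
  simp only [List.cons.injEq, and_true] at h
  exact Prod.ext h.1 h.2

-- closed form of port B
theorem pv_B_closed (s : String) :
    for_check_alt s =
      [((s.toList.zip s.toList.tail).count ('A', 'G') : Int),
       ((s.toList.zip s.toList.tail).count ('A', 'A') : Int),
       ((s.toList.zip s.toList.tail).count ('A', 'T') : Int),
       ((s.toList.zip s.toList.tail).count ('A', 'C') : Int),
       ((s.toList.zip s.toList.tail).count ('C', 'A') : Int),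
       ((s.toList.zip s.toList.tail).count ('C', 'G') : Int),
       ((s.toList.zip s.toList.tail).count ('C', 'T') : Int),
       ((s.toList.zip s.toList.tail).count ('C', 'C') : Int),
       ((s.toList.zip s.toList.tail).count ('T', 'A') : Int),
       ((s.toList.zip s.toList.tail).count ('T', 'G') : Int),
       ((s.toList.zip s.toList.tail).count ('T', 'T') : Int),
       ((s.toList.zip s.toList.tail).count ('T', 'C') : Int),
       ((s.toList.zip s.toList.tail).count ('C', 'A') : Int),
       ((s.toList.zip s.toList.tail).count ('G', 'G') : Int),
       ((s.toList.zip s.toList.tail).count ('G', 'T') : Int),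
       ((s.toList.zip s.toList.tail).count ('G', 'C') : Int)] := by
  unfold for_check_alt
  dsimp only
  rw [PySem.List.slice_from s.toList (by omega), show ((1:Int)).toNat = 1 from rfl,
      List.drop_one]
  simp only [List.map_cons, List.map_nil, PySem.Dict.getD_foldl_insert_add_one]
  have hcm : ∀ x y : Char,
      List.count [x, y] ((s.toList.zip s.toList.tail).map (fun xy => [xy.1, xy.2]))
        = List.count (x, y) (s.toList.zip s.toList.tail) :=
    fun x y => List.count_map_of_injective _ _ pv_pair_inj (x, y)
  simp only [hcm]
  simp [PySem.Dict.getD]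

-- ===== VERDICT =====
theorem for_check_spec : Claim_equal_for_check := by
  intro s _
  show for_check s = for_check_alt s
  rw [pv_A_closed, pv_B_closed]
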